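-- pv_equiv track=rewrite | github.com/jsnider3/JavaWorkspace | Competitive/Python/hacklib.py | uniq_in_range
-- ===== SOURCE A (Python) =====
-- def uniq_in_range(seq, k):
--   ''' Return a sequence with elements removed so that
--       no duplicates are within k of each other in the
--       output. '''
--   res = []
--   ind = 0
--   spots = {}
--   for elm in seq:
--     if elm not in spots or spots[elm] + k < ind:
--       spots[elm] = ind
--       res.append(elm)
--       ind += 1
--   return res
-- ===== SOURCE B (Python) =====
-- def uniq_in_range(seq, k):
--   ''' Return a sequence with elements removed so that
--       no duplicates are within k of each other in the
--       output. '''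
--   res = []
--   window = set()   # the elements of res[start:], the last <= max(k,0) emitted
--   start = 0
--   for elm in seq:
--     if elm not in window:
--       res.append(elm)
--       window.add(elm)
--       if len(res) - start > max(k, 0):
--         window.discard(res[start])
--         start += 1
--   return res
-- ===== Notes on version B (the rewrite author's own statement) =====
-- stated objective: alternative
-- what changed: Replaces A's ever-growing dict of last-emitted indices plus an explicit output counter with a bounded self-evicting sliding window: a set of the last max(k,0) emitted elements (mirroring res[start:]) that answers the duplicate test by plain membership.
import Mathlib
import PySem

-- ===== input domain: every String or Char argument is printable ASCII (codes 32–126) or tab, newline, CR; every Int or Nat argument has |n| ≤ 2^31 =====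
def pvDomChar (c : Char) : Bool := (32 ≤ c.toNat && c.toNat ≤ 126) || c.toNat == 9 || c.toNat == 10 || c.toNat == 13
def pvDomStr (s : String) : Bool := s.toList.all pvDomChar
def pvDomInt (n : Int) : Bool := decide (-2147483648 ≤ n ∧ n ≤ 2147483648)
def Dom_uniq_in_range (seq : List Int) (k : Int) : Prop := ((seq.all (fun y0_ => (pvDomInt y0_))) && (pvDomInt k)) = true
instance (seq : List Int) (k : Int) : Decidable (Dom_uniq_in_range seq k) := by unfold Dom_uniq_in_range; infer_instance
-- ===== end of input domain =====

-- B drops A's ever-growing dict of last-seen indices and the index counter: it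
-- keeps a bounded self-evicting window (a set mirroring res[start:], the last
-- max(k,0) emitted elements) and emits elm iff elm is not in that window.

-- ===== PORT A =====
-- A's loop state: (res, ind, spots)
def uniqStepA (k : Int) (st : List Int × Int × PySem.Dict Int Int) (elm : Int) :
    List Int × Int × PySem.Dict Int Int :=
  match st with
  | (res, ind, spots) =>
    -- 'if elm not in spots or spots[elm] + k < ind:'
    match spots.get? elm with
    | none => (res ++ [elm], ind + 1, spots.insert elm ind)
    | some p =>
      if p + k < ind then (res ++ [elm], ind + 1, spots.insert elm ind)
      else (res, ind, spots)

def uniq_in_range (seq : List Int) (k : Int) : List Int :=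
  (seq.foldl (uniqStepA k) ([], 0, PySem.Dict.empty)).1

-- ===== PORT B =====
-- B's loop state: (res, window, start); window holds the elements of res[start:]
def uniqStepB (k : Int) (st : List Int × PySem.Set Int × Int) (elm : Int) :
    List Int × PySem.Set Int × Int :=
  match st with
  | (res, window, start) =>
    if elm ∈ window then (res, window, start)
    else
      let res' := res ++ [elm]
      let window' := PySem.Set.add window elm
      if max k 0 < (res'.length : Int) - start then
        match PySem.List.pyGet? res' start with
        | some v => (res', PySem.Set.discard window' v, start + 1)
        | none => (res', window', start + 1)  -- unreachable: 0 <= start < len(res')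
      else (res', window', start)

def uniq_in_range_alt (seq : List Int) (k : Int) : List Int :=
  (seq.foldl (uniqStepB k) ([], PySem.Set.empty, 0)).1

-- ===== PRECONDITION & SPEC =====
def Spec_uniq_in_range (seq : List Int) (k : Int) (out : List Int) : Prop := out = uniq_in_range_alt seq k
instance (seq : List Int) (k : Int) (out : List Int) : Decidable (Spec_uniq_in_range seq k out) := by unfold Spec_uniq_in_range; infer_instance

-- ===== CLAIM (what is proved, stated in full; the proofs are below) =====
def Claim_equal_uniq_in_range : Prop := ∀ (seq : List Int) (k : Int), Dom_uniq_in_range seq k → Spec_uniq_in_range seq k (uniq_in_range seq k)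

-- ===== LEMMAS AND PROOFS =====

-- index of the LAST occurrence of x in res (as an Int), none if x is absent
def lastIdx : List Int → Int → Option Int
  | [], _ => none
  | a :: t, x =>
    match lastIdx t x with
    | some p => some (p + 1)
    | none => if a = x then some 0 else none

theorem lastIdx_nonneg (res : List Int) (x p : Int) (h : lastIdx res x = some p) : 0 ≤ p := by
  induction res generalizing p with
  | nil => simp [lastIdx] at h
  | cons a t ih =>
    simp only [lastIdx] at h
    cases h' : lastIdx t x with
    | none => rw [h'] at h; split_ifs at h; simp_all
    | some q => rw [h'] at h; cases h; have := ih q h'; omega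

theorem lastIdx_none_iff (res : List Int) (x : Int) :
    lastIdx res x = none ↔ x ∉ res := by
  induction res with
  | nil => simp [lastIdx]
  | cons a t ih =>
    simp only [lastIdx, List.mem_cons]
    cases h : lastIdx t x <;> simp_all [eq_comm]

theorem lastIdx_append (res : List Int) (e x : Int) :
    lastIdx (res ++ [e]) x = if e = x then some (res.length : Int) else lastIdx res x := by
  induction res with
  | nil => simp [lastIdx]
  | cons a t ih =>
    simp only [List.cons_append, lastIdx, ih]
    by_cases he : e = x
    · simp [he]
    · simp [he]

theorem lastIdx_mem_drop (res : List Int) (x p : Int) (m : Nat)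
    (h : lastIdx res x = some p) : x ∈ res.drop m ↔ (m : Int) ≤ p := by
  induction res generalizing p m with
  | nil => simp [lastIdx] at h
  | cons a t ih =>
    simp only [lastIdx] at h
    cases m with
    | zero =>
      have hh : lastIdx (a :: t) x = some p := by simpa [lastIdx] using h
      have hp := lastIdx_nonneg (a :: t) x p hh
      have hmem : x ∈ a :: t := by
        by_contra hn
        rw [(lastIdx_none_iff (a :: t) x).mpr hn] at hh
        cases hh
      simpa [hmem] using hp
    | succ n =>
      cases h' : lastIdx t x with
      | none =>
        rw [h'] at h
        have hnt : x ∉ t := (lastIdx_none_iff t x).mp h'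
        split_ifs at h with ha; cases h
        rw [List.drop_succ_cons]
        constructor
        · intro hd; exact absurd (List.mem_of_mem_drop hd) hnt
        · intro hle; exfalso; push_cast at hle; omega
      | some q =>
        rw [h'] at h; cases h
        simp only [List.drop_succ_cons]
        rw [ih q n h']
        push_cast
        constructor <;> intro <;> omega

theorem lastIdx_lt_length (res : List Int) (x p : Int) (h : lastIdx res x = some p) :
    p < (res.length : Int) := by
  induction res generalizing p with
  | nil => simp [lastIdx] at h
  | cons a t ih =>
    simp only [lastIdx] at h
    cases h' : lastIdx t x with
    | none =>
      rw [h'] at h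
      split_ifs at h with ha
      cases h
      exact_mod_cast Nat.succ_pos t.length
    | some q =>
      rw [h'] at h; cases h
      have := ih q h'
      simp only [List.length_cons]; push_cast; omega

-- inserting elm at index len(res) keeps the spots/lastIdx correspondence
theorem inv_insert (res : List Int) (elm : Int) (spots : PySem.Dict Int Int)
    (hsp : ∀ x, spots.get? x = lastIdx res x) (x : Int) :
    (spots.insert elm (res.length : Int)).get? x = lastIdx (res ++ [elm]) x := by
  rw [PySem.Dict.get?_insert, lastIdx_append]
  by_cases hx : x = elm
  · simp [hx]
  · rw [if_neg hx, if_neg (fun h => hx h.symm), hsp x]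

-- one emitting step of B preserves B's window invariants
theorem stepB_emit (k : Int) (res : List Int) (window : PySem.Set Int) (s : Nat) (elm : Int)
    (hlen : s ≤ res.length)
    (hnd : (res.drop s).Nodup)
    (hwin : ∀ x, x ∈ window ↔ x ∈ res.drop s)
    (hnm : elm ∉ window) :
    ∃ (window' : PySem.Set Int) (s' : Nat),
      uniqStepB k (res, window, (s : Int)) elm = (res ++ [elm], window', (s' : Int)) ∧
      s' ≤ (res ++ [elm]).length ∧
      (((res ++ [elm]).length : Int) - s' =
        if max k 0 < ((res ++ [elm]).length : Int) - s then ((res.length : Int) - s) else ((res ++ [elm]).length : Int) - s) ∧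
      ((res ++ [elm]).drop s').Nodup ∧
      (∀ x, x ∈ window' ↔ x ∈ (res ++ [elm]).drop s') := by
  have hdrop : (res ++ [elm]).drop s = res.drop s ++ [elm] :=
    List.drop_append_of_le_length hlen
  have hnd' : ((res ++ [elm]).drop s).Nodup := by
    rw [hdrop]
    exact List.Nodup.append hnd (List.nodup_singleton elm)
      (by simpa using fun h => hnm ((hwin elm).mpr h))
  have hwin' : ∀ x, x ∈ PySem.Set.add window elm ↔ x ∈ (res ++ [elm]).drop s := by
    intro x
    rw [PySem.Set.mem_add, hdrop, List.mem_append, hwin x, List.mem_singleton]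
  by_cases hc : max k 0 < ((res ++ [elm]).length : Int) - s
  · -- evict res'[s]
    have hslt : s < (res ++ [elm]).length := by simp; omega
    have hget : PySem.List.pyGet? (res ++ [elm]) (s : Int) = some ((res ++ [elm])[s]) := by
      rw [PySem.List.pyGet?_natCast, List.getElem?_eq_getElem hslt]
    have hcons : (res ++ [elm]).drop s = (res ++ [elm])[s] :: (res ++ [elm]).drop (s + 1) :=
      List.drop_eq_getElem_cons hslt
    refine ⟨PySem.Set.discard (PySem.Set.add window elm) (res ++ [elm])[s], s + 1, ?_, ?_, ?_, ?_, ?_⟩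
    · simp only [uniqStepB, if_neg hnm, if_pos hc, hget]
      push_cast; rfl
    · omega
    · rw [if_pos hc]; push_cast [List.length_append, List.length_singleton]; ring
    · rw [hcons] at hnd'; exact hnd'.of_cons
    · intro x
      rw [PySem.Set.mem_discard, hwin' x, hcons, List.mem_cons]
      rw [hcons] at hnd'
      rcases List.nodup_cons.mp hnd' with ⟨hv, _⟩
      constructor
      · rintro ⟨h1 | h1, h2⟩
        · exact absurd h1 h2
        · exact h1
      · intro h1; exact ⟨Or.inr h1, fun he => hv (he ▸ h1)⟩
  · refine ⟨PySem.Set.add window elm, s, ?_, ?_, ?_, hnd', hwin'⟩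
    · simp only [uniqStepB, if_neg hnm, if_neg hc]
    · simp; omega
    · rw [if_neg hc]
theorem uniq_main (k : Int) (seq : List Int) (res : List Int) (ind : Int)
    (spots : PySem.Dict Int Int) (window : PySem.Set Int) (s : Nat)
    (hind : ind = (res.length : Int))
    (hsp : ∀ x, spots.get? x = lastIdx res x)
    (hlen : s ≤ res.length)
    (hw : (res.length : Int) - s = min (res.length : Int) (max k 0))
    (hnd : (res.drop s).Nodup)
    (hwin : ∀ x, x ∈ window ↔ x ∈ res.drop s) :
    (seq.foldl (uniqStepA k) (res, ind, spots)).1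
      = (seq.foldl (uniqStepB k) (res, window, (s : Int))).1 := by
  induction seq generalizing res ind spots window s with
  | nil => simp
  | cons elm t ih =>
    subst hind
    simp only [List.foldl_cons]
    -- the two emit conditions agree
    have hmemdrop : ∀ p : Int, lastIdx res elm = some p → (elm ∈ res.drop s ↔ (s : Int) ≤ p) :=
      fun p hp => lastIdx_mem_drop res elm p s hp
    cases hsA : spots.get? elm with
    | none =>
      have hl : lastIdx res elm = none := by rw [← hsp elm]; exact hsA
      have hnotin : elm ∉ res := (lastIdx_none_iff res elm).mp hl
      have hnm : elm ∉ window := fun h => hnotin (List.mem_of_mem_drop ((hwin elm).mp h))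
      obtain ⟨window', s', heq, hlen', hw', hnd', hwin'⟩ :=
        stepB_emit k res window s elm hlen hnd hwin hnm
      have hA : uniqStepA k (res, (res.length : Int), spots) elm
          = (res ++ [elm], (res.length : Int) + 1, spots.insert elm (res.length : Int)) := by
        simp [uniqStepA, hsA]
      rw [hA, heq]
      exact ih _ _ _ _ _ (by simp) (inv_insert res elm spots hsp) hlen'
        (by split_ifs at hw' <;> simp at * <;> omega) hnd' hwin'
    | some p =>
      have hl : lastIdx res elm = some p := by rw [← hsp elm]; exact hsA
      have hp0 := lastIdx_nonneg res elm p hl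
      have hplen := lastIdx_lt_length res elm p hl
      have hmem : elm ∈ window ↔ (s : Int) ≤ p := (hwin elm).trans (hmemdrop p hl)
      by_cases hc : p + k < (res.length : Int)
      · -- both emit
        have hnm : elm ∉ window := fun h => by
          have := hmem.mp h; omega
        obtain ⟨window', s', heq, hlen', hw', hnd', hwin'⟩ :=
          stepB_emit k res window s elm hlen hnd hwin hnm
        have hA : uniqStepA k (res, (res.length : Int), spots) elm
            = (res ++ [elm], (res.length : Int) + 1, spots.insert elm (res.length : Int)) := by
          simp [uniqStepA, hsA, hc]
        rw [hA, heq]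
        exact ih _ _ _ _ _ (by simp) (inv_insert res elm spots hsp) hlen'
          (by split_ifs at hw' <;> simp at * <;> omega) hnd' hwin'
      · -- both skip
        have hin : elm ∈ window := hmem.mpr (by omega)
        have hA : uniqStepA k (res, (res.length : Int), spots) elm
            = (res, (res.length : Int), spots) := by
          simp [uniqStepA, hsA, hc]
        have hB : uniqStepB k (res, window, (s : Int)) elm = (res, window, (s : Int)) := by
          simp [uniqStepB, hin]
        rw [hA, hB]
        exact ih _ _ _ _ _ rfl hsp hlen hw hnd hwin

-- ===== VERDICT (by name: the statement is the Claim_ definition above) =====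
theorem uniq_in_range_spec : Claim_equal_uniq_in_range := by
  intro seq k _
  unfold Spec_uniq_in_range uniq_in_range uniq_in_range_alt
  exact uniq_main k seq [] 0 PySem.Dict.empty PySem.Set.empty 0 (by simp)
    (fun x => by simp [PySem.Dict.get?_empty, lastIdx]) (by simp) (by simp)
    (by simp) (fun x => by simp [PySem.Set.empty])
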